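-- pv_equiv track=rewrite | github.com/SuyeonChoi/Algorithms | CodingTest/11st_1.py | solution
-- ===== SOURCE A (Python) =====
-- def solution(A):
--     # write your code in Python 3.6
--     if len(A) == 1:
--         return 1
--     _max = max(A)
--     spike = {_max: 1}
--     cnt = 1
--     for n in A:
--         if n == _max:
--             continue
--         if n in spike:
--             if spike[n] < 2:
--                 spike[n] += 1
--                 cnt += 1
--         else:
--             spike[n] = 1
--             cnt += 1
--     return cnt
-- ===== SOURCE B (Python) =====
-- def solution(A):
--     # count-then-aggregate: full frequency table first, then one pass over
--     # distinct values capping each at 2; the max contributes exactly 1.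
--     _max = max(A)
--     counts = {}
--     for n in A:
--         counts[n] = counts.get(n, 0) + 1
--     total = 1
--     for value, c in counts.items():
--         if value != _max:
--             total += min(c, 2)
--     return total
-- ===== Notes on version B (the rewrite author's own statement) =====
-- stated objective: simpler
-- what changed: Replaces A's single scan with inline cap-at-2 branch logic over a partially-capped dict by a two-phase count-then-aggregate: build a full frequency table, then sum min(count,2) over distinct non-max values; no len(A)==1 special case is needed.
-- outside the precondition, e.g. on solution([]): A raises ValueError, B raises ValueError
import Mathlib
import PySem

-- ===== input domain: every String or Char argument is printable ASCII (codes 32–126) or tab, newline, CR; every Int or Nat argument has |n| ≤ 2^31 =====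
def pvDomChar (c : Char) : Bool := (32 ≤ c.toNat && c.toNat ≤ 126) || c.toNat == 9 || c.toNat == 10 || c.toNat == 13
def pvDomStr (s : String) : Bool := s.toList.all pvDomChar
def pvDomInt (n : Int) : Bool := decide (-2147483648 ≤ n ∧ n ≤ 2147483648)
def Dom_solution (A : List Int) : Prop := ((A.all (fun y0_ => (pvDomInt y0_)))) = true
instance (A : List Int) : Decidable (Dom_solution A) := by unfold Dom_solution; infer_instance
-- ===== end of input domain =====

-- B replaces A's single scan with inline cap-at-2 logic by a two-phase
-- count-then-aggregate over distinct values (objective: simpler).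

-- ===== PORT A =====
-- one step of A's 'for n in A' loop; state = (spike, cnt)
def solStepA (m : Int) (st : PySem.Dict Int Int × Int) (n : Int) : PySem.Dict Int Int × Int :=
  if n = m then st
  else if st.1.contains n then
    -- 'spike[n]' is exact as getD here: the key is present in this branch
    if st.1.getD n 0 < 2 then (st.1.insert n (st.1.getD n 0 + 1), st.2 + 1) else st
  else (st.1.insert n 1, st.2 + 1)

def solution (A : List Int) : Int :=
  if A.length = 1 then 1
  else
    match PySem.List.max? A (fun y => y) with
    | none => 0  -- Python raises ValueError (max of empty); excluded by Pre_solution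
    | some m => (A.foldl (solStepA m) (PySem.Dict.empty.insert m 1, 1)).2

-- ===== PORT B =====
def solution_alt (A : List Int) : Int :=
  match PySem.List.max? A (fun y => y) with
  | none => 0  -- Python raises ValueError (max of empty); excluded by Pre_solution
  | some m =>
    let counts := A.foldl (fun d n => d.insert n (d.getD n 0 + 1)) (PySem.Dict.empty : PySem.Dict Int Int)
    counts.items.foldl (fun t p => if p.1 ≠ m then t + min p.2 2 else t) 1

-- ===== PRECONDITION & SPEC =====
-- Pre_ excludes only the empty list, where Python's max([]) raises ValueError in both A and B.
def Pre_solution (A : List Int) : Prop := A ≠ []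
instance (A : List Int) : Decidable (Pre_solution A) := by unfold Pre_solution; infer_instance
def pvWitness_solution : List Int := [1, 2, 2]

def Spec_solution (A : List Int) (out : Int) : Prop := out = solution_alt A
instance (A : List Int) (out : Int) : Decidable (Spec_solution A out) := by unfold Spec_solution; infer_instance

-- ===== CLAIM (what is proved, stated in full; the proofs are below) =====
def Claim_equal_solution : Prop := ∀ (A : List Int), Dom_solution A → Pre_solution A → Spec_solution A (solution A)

-- ===== LEMMAS AND PROOFS =====

-- the capped-count sum both programs compute: over distinct non-max values,
-- min(v k + count, 2) - v k (v = capped counts already absorbed into the dict state)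
def solSum (m : Int) (l : List Int) (v : Int → Int) : Int :=
  ∑ k ∈ (l.filter (fun x => x ≠ m)).toFinset, (min (v k + l.count k) 2 - v k)

lemma solSum_nil (m : Int) (v : Int → Int) : solSum m [] v = 0 := by
  simp [solSum]

lemma solSum_cons_max (m : Int) (l : List Int) (v : Int → Int) :
    solSum m (m :: l) v = solSum m l v := by
  unfold solSum
  have hfc : (m :: l).filter (fun x => x ≠ m) = l.filter (fun x => x ≠ m) := by
    rw [List.filter_cons]; simp
  rw [hfc]
  apply Finset.sum_congr rfl
  intro k hk
  have hkm : k ≠ m := by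
    simp only [List.mem_toFinset, List.mem_filter, decide_eq_true_eq] at hk
    simpa using hk.2
  simp [Ne.symm hkm]

lemma solSum_cons (m n : Int) (l : List Int) (v : Int → Int) (hn : n ≠ m)
    (hb : ∀ k, 0 ≤ v k ∧ v k ≤ 2) :
    solSum m (n :: l) v
      = (min (v n + 1) 2 - v n)
        + solSum m l (fun k => if k = n then min (v n + 1) 2 else v k) := by
  unfold solSum
  have hfc : (n :: l).filter (fun x => x ≠ m) = n :: l.filter (fun x => x ≠ m) := by
    rw [List.filter_cons, if_pos (by simpa using hn)]
  rw [hfc, List.toFinset_cons]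
  by_cases hmem : n ∈ (l.filter (fun x => x ≠ m)).toFinset
  · have hsum :
        (∑ k ∈ (l.filter (fun x => x ≠ m)).toFinset.erase n,
            (min (v k + (n :: l).count k) 2 - v k))
          = ∑ k ∈ (l.filter (fun x => x ≠ m)).toFinset.erase n,
              (min ((fun k => if k = n then min (v n + 1) 2 else v k) k + l.count k) 2
                - (fun k => if k = n then min (v n + 1) 2 else v k) k) := by
      apply Finset.sum_congr rfl
      intro k hk
      have hkn : k ≠ n := (Finset.mem_erase.mp hk).1
      simp [hkn, Ne.symm hkn]
    rw [Finset.insert_eq_self.mpr hmem, ← Finset.add_sum_erase _ _ hmem,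
      ← Finset.add_sum_erase _ _ hmem, hsum, ← add_assoc]
    congr 1
    have hbn := hb n
    simp only [List.count_cons_self]
    push_cast
    omega
  · rw [Finset.sum_insert hmem]
    have hnl : n ∉ l := by
      intro h
      exact hmem (by simp [List.mem_toFinset, h, hn])
    have hcn : l.count n = 0 := List.count_eq_zero.mpr hnl
    have hsum :
        (∑ k ∈ (l.filter (fun x => x ≠ m)).toFinset,
            (min (v k + (n :: l).count k) 2 - v k))
          = ∑ k ∈ (l.filter (fun x => x ≠ m)).toFinset,
              (min ((fun k => if k = n then min (v n + 1) 2 else v k) k + l.count k) 2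
                - (fun k => if k = n then min (v n + 1) 2 else v k) k) := by
      apply Finset.sum_congr rfl
      intro k hk
      have hkn : k ≠ n := by intro h; subst h; exact hmem hk
      simp [hkn, Ne.symm hkn]
    rw [hsum]
    congr 1
    have hbn := hb n
    simp only [List.count_cons_self, hcn]
    push_cast
    omega

-- A's loop computes c plus the capped-count sum, for any dict state represented by v
lemma loopA_eq (m : Int) (l : List Int) (d : PySem.Dict Int Int) (c : Int) (v : Int → Int)
    (hm : d.get? m = some 1)
    (hv : ∀ k, k ≠ m → d.get? k = if v k = 0 then none else some (v k))
    (hb : ∀ k, 0 ≤ v k ∧ v k ≤ 2) :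
    (l.foldl (solStepA m) (d, c)).2 = c + solSum m l v := by
  induction l generalizing d c v with
  | nil => simp [solSum_nil]
  | cons n l ih =>
    rw [List.foldl_cons]
    by_cases hn : n = m
    · subst hn
      rw [show solStepA n (d, c) n = (d, c) from by simp [solStepA]]
      rw [ih d c v hm hv hb, solSum_cons_max]
    · have hcont : d.contains n = (decide (v n ≠ 0)) := by
        rw [PySem.Dict.contains_eq_isSome_get?, hv n hn]
        by_cases h : v n = 0 <;> simp [h]
      have hgd : v n ≠ 0 → d.getD n 0 = v n := by
        intro h
        rw [PySem.Dict.getD_eq_get?_getD, hv n hn, if_neg h, Option.getD_some]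
      have hb' : ∀ k, 0 ≤ (fun k => if k = n then min (v n + 1) 2 else v k) k ∧
          (fun k => if k = n then min (v n + 1) 2 else v k) k ≤ 2 := by
        intro k
        beta_reduce
        by_cases h : k = n
        · rw [if_pos h]; have := hb n; omega
        · rw [if_neg h]; exact hb k
      have hvn3 : v n = 0 ∨ v n = 1 ∨ v n = 2 := by have := hb n; omega
      rw [solSum_cons m n l v hn hb]
      rcases hvn3 with h0 | h1 | h2
      · have hst : solStepA m (d, c) n = (d.insert n 1, c + 1) := by
          simp [solStepA, hn, hcont, h0]
        rw [hst, ih _ _ (fun k => if k = n then min (v n + 1) 2 else v k)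
          (by rw [PySem.Dict.get?_insert, if_neg (Ne.symm hn)]; exact hm)
          (by
            intro k hk
            rw [PySem.Dict.get?_insert]
            by_cases hkn : k = n
            · subst hkn; norm_num [h0]
            · rw [if_neg hkn, hv k hk]; simp [hkn])
          hb']
        have hd : min (v n + 1) 2 - v n = 1 := by omega
        rw [hd]; ring
      · have hst : solStepA m (d, c) n = (d.insert n (v n + 1), c + 1) := by
          have hg : d.getD n 0 = v n := hgd (by omega)
          simp [solStepA, hn, hcont, hg, h1]
        rw [hst, ih _ _ (fun k => if k = n then min (v n + 1) 2 else v k)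
          (by rw [PySem.Dict.get?_insert, if_neg (Ne.symm hn)]; exact hm)
          (by
            intro k hk
            rw [PySem.Dict.get?_insert]
            by_cases hkn : k = n
            · subst hkn; norm_num [h1]
            · rw [if_neg hkn, hv k hk]; simp [hkn])
          hb']
        have hd : min (v n + 1) 2 - v n = 1 := by omega
        rw [hd]; ring
      · have hst : solStepA m (d, c) n = (d, c) := by
          have hg : d.getD n 0 = v n := hgd (by omega)
          simp [solStepA, hn, hcont, hg, h2]
        rw [hst, ih d c (fun k => if k = n then min (v n + 1) 2 else v k) hm
          (by
            intro k hk
            by_cases hkn : k = n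
            · subst hkn; rw [hv k hk]; norm_num [h2]
            · rw [hv k hk]; simp [hkn])
          hb']
        have hd : min (v n + 1) 2 - v n = 0 := by omega
        rw [hd]; ring

-- A = 1 + solSum for the all-zeros valuation
lemma solutionA_eq (A : List Int) (m : Int) (hmax : PySem.List.max? A (fun y => y) = some m) :
    solution A = 1 + solSum m A (fun _ => 0) := by
  by_cases hlen : A.length = 1
  · obtain ⟨a, rfl⟩ := List.length_eq_one_iff.mp hlen
    rw [PySem.List.max?_id_cons] at hmax
    simp only [List.foldl_nil, Option.some.injEq] at hmax
    subst hmax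
    simp [solution, solSum]
  · unfold solution
    rw [if_neg hlen, hmax]
    have h0 := loopA_eq m A (PySem.Dict.empty.insert m 1) 1 (fun _ => 0)
      (PySem.Dict.get?_insert_self _ _ _)
      (by
        intro k hk
        rw [PySem.Dict.get?_insert, if_neg hk, PySem.Dict.get?_empty]
        simp)
      (by intro k; norm_num)
    simpa using h0

-- B = 1 + the same sum
lemma solutionB_eq (A : List Int) (m : Int) (hmax : PySem.List.max? A (fun y => y) = some m) :
    solution_alt A = 1 + solSum m A (fun _ => 0) := by
  unfold solution_alt
  simp only [hmax]
  rw [PySem.Dict.foldl_insert_getD_add_one_eq_counter, PySem.Dict.items_counter]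
  rw [PySem.List.foldl_ite_eq_foldl_filter (p := fun q : Int × Int => q.1 ≠ m)
    (f := fun t q => t + min q.2 2)]
  rw [PySem.List.foldl_add (g := fun q : Int × Int => min q.2 2)]
  rw [List.filter_map, List.map_map]
  simp only [Function.comp_def]
  congr 1
  have hnd : ((PySem.Set.ofList A).filter (fun k => decide (k ≠ m))).Nodup :=
    (PySem.Set.nodup_ofList A).filter _
  rw [← List.sum_toFinset _ hnd]
  have hfin : ((PySem.Set.ofList A).filter (fun k => decide (k ≠ m))).toFinset
      = (A.filter (fun x => x ≠ m)).toFinset := by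
    ext k
    simp [PySem.Set.mem_ofList]
  rw [hfin]
  unfold solSum
  apply Finset.sum_congr rfl
  intro k _
  push_cast
  omega

-- ===== VERDICT (by name: the statement is the Claim_ definition above) =====
theorem solution_spec : Claim_equal_solution := by
  intro A _ hpre
  unfold Spec_solution
  obtain ⟨m, hmax⟩ : ∃ m, PySem.List.max? A (fun y => y) = some m := by
    cases hA : A with
    | nil => exact absurd hA hpre
    | cons x t => exact ⟨t.foldl max x, PySem.List.max?_id_cons x t⟩
  rw [solutionA_eq A m hmax, solutionB_eq A m hmax]
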